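-- pv_equiv track=rewrite | github.com/dennyzhang/devops_public | python/parse_log_for_errmsg/parse_log_for_errmsg.py | filter_errmsg_by_whitelist
-- ===== SOURCE A (Python) =====
-- def filter_errmsg_by_whitelist(err_msg_list, whitelist_pattern_list):
--     ret_msg_list = []
--     for line in err_msg_list:
--         has_matched = False
--         for whitelist_pattern in whitelist_pattern_list:
--             if whitelist_pattern in line:
--                 has_matched = True
--                 break
--         if has_matched is False:
--             ret_msg_list.append(line)
--     return ret_msg_list
-- ===== SOURCE B (Python) =====
-- def filter_errmsg_by_whitelist(err_msg_list, whitelist_pattern_list):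
--     # pattern-major: successively strip the lines matching each pattern
--     remaining = list(err_msg_list)
--     for pattern in whitelist_pattern_list:
--         remaining = [line for line in remaining if pattern not in line]
--     return remaining
-- ===== Notes on version B (the rewrite author's own statement) =====
-- stated objective: alternative
-- what changed: B swaps the loop nesting: instead of scanning all patterns per line with a matched flag and a break, it folds over the patterns, filtering the surviving lines once per pattern; the proof shows the pattern-major traversal yields the same filtered list.
import Mathlib
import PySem

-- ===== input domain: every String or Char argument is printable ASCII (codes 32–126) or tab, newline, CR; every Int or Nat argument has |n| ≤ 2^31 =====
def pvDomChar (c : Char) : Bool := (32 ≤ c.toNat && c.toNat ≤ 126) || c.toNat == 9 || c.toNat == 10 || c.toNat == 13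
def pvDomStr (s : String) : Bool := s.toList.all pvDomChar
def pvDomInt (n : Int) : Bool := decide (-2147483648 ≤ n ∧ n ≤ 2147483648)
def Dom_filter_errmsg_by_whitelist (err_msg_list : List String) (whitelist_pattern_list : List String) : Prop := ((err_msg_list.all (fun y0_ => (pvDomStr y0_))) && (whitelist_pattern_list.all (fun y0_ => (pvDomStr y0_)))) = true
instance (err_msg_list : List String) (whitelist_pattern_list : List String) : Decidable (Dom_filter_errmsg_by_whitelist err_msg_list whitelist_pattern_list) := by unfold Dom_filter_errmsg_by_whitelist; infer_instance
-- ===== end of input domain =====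

-- B replaces A's line-major scan (matched flag + break per line) with a pattern-major fold that filters the surviving lines once per pattern; same cost, different traversal, proved equal.

-- ===== PORT A =====
-- inner loop: 'for whitelist_pattern in ...: if whitelist_pattern in line: has_matched = True; break'
def pvA_hasMatched (line : String) : List String → Bool
  | [] => false
  | p :: ps => if PySem.Str.isIn p line then true else pvA_hasMatched line ps

def filter_errmsg_by_whitelist (err_msg_list : List String) (whitelist_pattern_list : List String) : List String :=
  err_msg_list.foldl
    (fun ret_msg_list line =>
      if pvA_hasMatched line whitelist_pattern_list = false then ret_msg_list ++ [line]
      else ret_msg_list) []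

-- ===== PORT B =====
def filter_errmsg_by_whitelist_alt (err_msg_list : List String) (whitelist_pattern_list : List String) : List String :=
  whitelist_pattern_list.foldl
    (fun remaining pattern => remaining.filter (fun line => !PySem.Str.isIn pattern line))
    err_msg_list

-- ===== PRECONDITION & SPEC =====
def Spec_filter_errmsg_by_whitelist (err_msg_list : List String) (whitelist_pattern_list : List String) (out : List String) : Prop := out = filter_errmsg_by_whitelist_alt err_msg_list whitelist_pattern_list
instance (err_msg_list : List String) (whitelist_pattern_list : List String) (out : List String) : Decidable (Spec_filter_errmsg_by_whitelist err_msg_list whitelist_pattern_list out) := by unfold Spec_filter_errmsg_by_whitelist; infer_instance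

-- ===== CLAIM (what is proved, stated in full; the proofs are below) =====
def Claim_equal_filter_errmsg_by_whitelist : Prop := ∀ (err_msg_list : List String) (whitelist_pattern_list : List String), Dom_filter_errmsg_by_whitelist err_msg_list whitelist_pattern_list → Spec_filter_errmsg_by_whitelist err_msg_list whitelist_pattern_list (filter_errmsg_by_whitelist err_msg_list whitelist_pattern_list)

-- ===== LEMMAS AND PROOFS =====

-- B's pattern-major fold computes the filter by the negated "some pattern matches" test
theorem pvB_eq_filter (pats lines : List String) :
    pats.foldl (fun remaining pattern => remaining.filter (fun line => !PySem.Str.isIn pattern line)) lines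
      = lines.filter (fun line => !pvA_hasMatched line pats) := by
  induction pats generalizing lines with
  | nil => simp [pvA_hasMatched]
  | cons p ps ih =>
      simp only [List.foldl_cons, ih, List.filter_filter]
      apply List.filter_congr
      intro line _
      simp [pvA_hasMatched, PySem.Str.isIn, Bool.and_comm]

-- ===== VERDICT (by name: the statement is the Claim_ definition above) =====
theorem filter_errmsg_by_whitelist_spec : Claim_equal_filter_errmsg_by_whitelist := by
  intro lines pats _
  unfold Spec_filter_errmsg_by_whitelist filter_errmsg_by_whitelist filter_errmsg_by_whitelist_alt
  rw [pvB_eq_filter]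
  have h := PySem.List.foldl_append_if_eq_filter
    (p := fun line => pvA_hasMatched line pats = false) (l := lines) (acc := ([] : List String))
  simpa using h
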